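-- pv_equiv track=rewrite | github.com/aseimel/cses_agentic | src/test_dofile_parsing.py | categorize_by_variable_type
-- ===== SOURCE A (Python) =====
-- def categorize_by_variable_type(mappings: dict) -> dict:
--     """Categorize mappings by CSES variable type."""
--     categories = {
--         "F1XXX_admin": [],      # ID, weights, administration
--         "F2XXX_demo": [],       # Demographics
--         "F3XXX_survey": [],     # Survey questions
--         "F4XXX_district": [],   # District data
--         "F5XXX_macro": [],      # Macro data
--         "other": []
--     }
--
--     for var, info in mappings.items():
--         if var.startswith("F1"):
--             categories["F1XXX_admin"].append((var, info))
--         elif var.startswith("F2"):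
--             categories["F2XXX_demo"].append((var, info))
--         elif var.startswith("F3"):
--             categories["F3XXX_survey"].append((var, info))
--         elif var.startswith("F4"):
--             categories["F4XXX_district"].append((var, info))
--         elif var.startswith("F5"):
--             categories["F5XXX_macro"].append((var, info))
--         else:
--             categories["other"].append((var, info))
--
--     return categories
-- ===== SOURCE B (Python) =====
-- def categorize_by_variable_type(mappings: dict) -> dict:
--     """Categorize mappings by CSES variable type: one filtering pass per category.
--
--     Correct because the prefixes F1..F5 are mutually exclusive, so per-category
--     filters pick exactly the entries A's branch chain routes to each bucket."""
--     items = list(mappings.items())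
--     prefixes = [("F1XXX_admin", "F1"), ("F2XXX_demo", "F2"), ("F3XXX_survey", "F3"),
--                 ("F4XXX_district", "F4"), ("F5XXX_macro", "F5")]
--     categories = {cat: [(v, i) for v, i in items if v.startswith(p)]
--                   for cat, p in prefixes}
--     categories["other"] = [(v, i) for v, i in items
--                            if not any(v.startswith(p) for _, p in prefixes)]
--     return categories
-- ===== Notes on version B (the rewrite author's own statement) =====
-- stated objective: alternative
-- what changed: Instead of one pass dispatching each entry into a bucket through a six-way if/elif chain, B builds each category independently by its own filtering pass over the items (a dict comprehension of per-prefix filters plus a no-prefix-matches filter for 'other'), relying on the mutual exclusivity of the prefixes F1..F5.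
import Mathlib
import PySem

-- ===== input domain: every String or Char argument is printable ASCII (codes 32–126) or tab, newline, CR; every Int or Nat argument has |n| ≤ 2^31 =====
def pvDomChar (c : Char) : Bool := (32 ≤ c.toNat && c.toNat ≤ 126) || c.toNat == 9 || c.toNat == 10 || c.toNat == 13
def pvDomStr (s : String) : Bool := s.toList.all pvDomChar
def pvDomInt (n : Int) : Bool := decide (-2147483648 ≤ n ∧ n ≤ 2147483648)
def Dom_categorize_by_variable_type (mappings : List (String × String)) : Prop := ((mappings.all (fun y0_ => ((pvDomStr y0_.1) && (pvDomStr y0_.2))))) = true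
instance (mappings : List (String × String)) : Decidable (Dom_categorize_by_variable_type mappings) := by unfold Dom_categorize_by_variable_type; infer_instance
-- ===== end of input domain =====

-- B replaces A's single dispatching pass (six-way if/elif chain into mutable buckets) by one
-- independent filtering pass per category; correct since the prefixes F1..F5 are mutually exclusive.

-- ===== PORT A =====
def categorize_by_variable_type (mappings : List (String × String)) : List (String × List (String × String)) :=
  let categories : PySem.Dict String (List (String × String)) :=
    PySem.Dict.ofList [("F1XXX_admin", []), ("F2XXX_demo", []), ("F3XXX_survey", []),
                       ("F4XXX_district", []), ("F5XXX_macro", []), ("other", [])]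
  let categories := mappings.foldl (fun d vi =>
    let var := vi.1
    let info := vi.2
    if PySem.Str.startswith var "F1" then d.modify "F1XXX_admin" [] (· ++ [(var, info)])
    else if PySem.Str.startswith var "F2" then d.modify "F2XXX_demo" [] (· ++ [(var, info)])
    else if PySem.Str.startswith var "F3" then d.modify "F3XXX_survey" [] (· ++ [(var, info)])
    else if PySem.Str.startswith var "F4" then d.modify "F4XXX_district" [] (· ++ [(var, info)])
    else if PySem.Str.startswith var "F5" then d.modify "F5XXX_macro" [] (· ++ [(var, info)])
    else d.modify "other" [] (· ++ [(var, info)])) categories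
  categories.items

-- ===== PORT B =====
def pvPrefixes : List (String × String) :=
  [("F1XXX_admin", "F1"), ("F2XXX_demo", "F2"), ("F3XXX_survey", "F3"),
   ("F4XXX_district", "F4"), ("F5XXX_macro", "F5")]

def categorize_by_variable_type_alt (mappings : List (String × String)) : List (String × List (String × String)) :=
  -- dict comprehension: one independent filter pass per category
  let categories : PySem.Dict String (List (String × String)) :=
    pvPrefixes.foldl (fun d cp =>
      d.insert cp.1 (mappings.filter (fun vi => PySem.Str.startswith vi.1 cp.2)))
      PySem.Dict.empty
  let categories := categories.insert "other"
    (mappings.filter (fun vi => !(pvPrefixes.any (fun cp => PySem.Str.startswith vi.1 cp.2))))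
  categories.items

-- ===== PRECONDITION & SPEC =====
def Spec_categorize_by_variable_type (mappings : List (String × String)) (out : List (String × List (String × String))) : Prop := out = categorize_by_variable_type_alt mappings
instance (mappings : List (String × String)) (out : List (String × List (String × String))) : Decidable (Spec_categorize_by_variable_type mappings out) := by unfold Spec_categorize_by_variable_type; infer_instance

-- ===== CLAIM (what is proved, stated in full; the proofs are below) =====
def Claim_equal_categorize_by_variable_type : Prop := ∀ (mappings : List (String × String)), Dom_categorize_by_variable_type mappings → Spec_categorize_by_variable_type mappings (categorize_by_variable_type mappings)

-- ===== LEMMAS AND PROOFS =====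

-- the bucket key A's if/elif chain selects for an entry
def pvKeyOf (vi : String × String) : String :=
  if PySem.Str.startswith vi.1 "F1" then "F1XXX_admin"
  else if PySem.Str.startswith vi.1 "F2" then "F2XXX_demo"
  else if PySem.Str.startswith vi.1 "F3" then "F3XXX_survey"
  else if PySem.Str.startswith vi.1 "F4" then "F4XXX_district"
  else if PySem.Str.startswith vi.1 "F5" then "F5XXX_macro"
  else "other"

-- A's per-entry step is a modify at the selected key
theorem pv_step_eq (d : PySem.Dict String (List (String × String))) (vi : String × String) :
    (if PySem.Str.startswith vi.1 "F1" then d.modify "F1XXX_admin" [] (· ++ [(vi.1, vi.2)])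
     else if PySem.Str.startswith vi.1 "F2" then d.modify "F2XXX_demo" [] (· ++ [(vi.1, vi.2)])
     else if PySem.Str.startswith vi.1 "F3" then d.modify "F3XXX_survey" [] (· ++ [(vi.1, vi.2)])
     else if PySem.Str.startswith vi.1 "F4" then d.modify "F4XXX_district" [] (· ++ [(vi.1, vi.2)])
     else if PySem.Str.startswith vi.1 "F5" then d.modify "F5XXX_macro" [] (· ++ [(vi.1, vi.2)])
     else d.modify "other" [] (· ++ [(vi.1, vi.2)])) =
    d.modify (pvKeyOf vi) [] (· ++ [vi]) := by
  unfold pvKeyOf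
  split_ifs <;> rfl

-- value at each key after the modify-append loop
theorem pv_getD_fold (l : List (String × String)) (d : PySem.Dict String (List (String × String)))
    (c : String) :
    (l.foldl (fun d x => d.modify (pvKeyOf x) [] (· ++ [x])) d).getD c [] =
      d.getD c [] ++ l.filter (fun x => pvKeyOf x == c) := by
  induction l generalizing d with
  | nil => simp
  | cons x l ih =>
      simp only [List.foldl_cons, List.filter_cons, ih, PySem.Dict.getD_modify]
      by_cases h : pvKeyOf x == c
      · have hc : c = pvKeyOf x := (beq_iff_eq.mp h).symm
        simp [hc, List.append_assoc]
      · have hc : ¬ c = pvKeyOf x := fun e => h (beq_iff_eq.mpr e.symm)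
        simp [h, hc]

-- the modify-append loop never adds a key
theorem pv_fold_keys (l : List (String × String)) (d : PySem.Dict String (List (String × String)))
    (h : ∀ x : String × String, d.contains (pvKeyOf x) = true) :
    (l.foldl (fun d x => d.modify (pvKeyOf x) [] (· ++ [x])) d).keys = d.keys := by
  induction l generalizing d with
  | nil => rfl
  | cons x l ih =>
      simp only [List.foldl_cons]
      refine (ih _ ?_).trans ?_
      · intro y
        rw [PySem.Dict.contains_modify]
        simp [h y]
      · rw [PySem.Dict.keys_modify]
        rw [PySem.Dict.keys_insert_of_contains]
        exact h x

-- the two-character prefixes ['F', a] and ['F', b] with a ≠ b are mutually exclusive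
theorem pv_sw_excl (l : List Char) {a b : Char} (hab : a ≠ b)
    (h : PySem.Chars.startswith l ['F', a] = true) :
    PySem.Chars.startswith l ['F', b] = false := by
  obtain ⟨t, ht⟩ := (PySem.Chars.startswith_iff _ _).mp h
  cases hq : PySem.Chars.startswith l ['F', b] with
  | false => rfl
  | true =>
      obtain ⟨u, hu⟩ := (PySem.Chars.startswith_iff _ _).mp hq
      have he := ht.trans hu.symm
      simp only [List.cons_append, List.cons.injEq] at he
      exact absurd he.2.1 hab

-- A's result as six filters keyed by pvKeyOf
theorem pv_A_eq (mappings : List (String × String)) :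
    categorize_by_variable_type mappings
    = [("F1XXX_admin", mappings.filter (fun x => pvKeyOf x == "F1XXX_admin")),
       ("F2XXX_demo", mappings.filter (fun x => pvKeyOf x == "F2XXX_demo")),
       ("F3XXX_survey", mappings.filter (fun x => pvKeyOf x == "F3XXX_survey")),
       ("F4XXX_district", mappings.filter (fun x => pvKeyOf x == "F4XXX_district")),
       ("F5XXX_macro", mappings.filter (fun x => pvKeyOf x == "F5XXX_macro")),
       ("other", mappings.filter (fun x => pvKeyOf x == "other"))] := by
  simp only [categorize_by_variable_type]
  rw [PySem.List.foldl_congr_mem _ _ (fun d x => d.modify (pvKeyOf x) [] (· ++ [x])) _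
      (fun acc x _ => pv_step_eq acc x)]
  have hc : ∀ x : String × String,
      (PySem.Dict.ofList [("F1XXX_admin", ([] : List (String × String))), ("F2XXX_demo", []),
        ("F3XXX_survey", []), ("F4XXX_district", []), ("F5XXX_macro", []),
        ("other", [])]).contains (pvKeyOf x) = true := by
    intro x; unfold pvKeyOf; split_ifs <;> decide
  have hkeys := pv_fold_keys mappings _ hc
  have hnd : (mappings.foldl (fun d x => d.modify (pvKeyOf x) [] (· ++ [x]))
      (PySem.Dict.ofList [("F1XXX_admin", []), ("F2XXX_demo", []), ("F3XXX_survey", []),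
        ("F4XXX_district", []), ("F5XXX_macro", []), ("other", [])])).keys.Nodup := by
    rw [hkeys]; decide
  rw [PySem.Dict.items_eq_map_keys _ hnd ([] : List (String × String)), hkeys]
  simp only [pv_getD_fold]
  rfl

-- B's result written out
theorem pv_B_eq (mappings : List (String × String)) :
    categorize_by_variable_type_alt mappings
    = [("F1XXX_admin", mappings.filter (fun vi => PySem.Str.startswith vi.1 "F1")),
       ("F2XXX_demo", mappings.filter (fun vi => PySem.Str.startswith vi.1 "F2")),
       ("F3XXX_survey", mappings.filter (fun vi => PySem.Str.startswith vi.1 "F3")),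
       ("F4XXX_district", mappings.filter (fun vi => PySem.Str.startswith vi.1 "F4")),
       ("F5XXX_macro", mappings.filter (fun vi => PySem.Str.startswith vi.1 "F5")),
       ("other", mappings.filter (fun vi =>
         !(pvPrefixes.any (fun cp => PySem.Str.startswith vi.1 cp.2))))] := rfl

-- the branch-chosen key equals each per-category test (prefixes are exclusive)
theorem pv_filt1 : (fun x : String × String => pvKeyOf x == "F1XXX_admin")
    = (fun vi : String × String => PySem.Str.startswith vi.1 "F1") := by
  funext x; unfold pvKeyOf; split_ifs <;> simp_all

theorem pv_filt2 : (fun x : String × String => pvKeyOf x == "F2XXX_demo")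
    = (fun vi : String × String => PySem.Str.startswith vi.1 "F2") := by
  funext x; unfold pvKeyOf
  split_ifs <;> simp_all [pv_sw_excl x.1.toList (a := '1') (b := '2') (by decide)]

theorem pv_filt3 : (fun x : String × String => pvKeyOf x == "F3XXX_survey")
    = (fun vi : String × String => PySem.Str.startswith vi.1 "F3") := by
  funext x; unfold pvKeyOf
  split_ifs <;> simp_all [pv_sw_excl x.1.toList (a := '1') (b := '3') (by decide),
    pv_sw_excl x.1.toList (a := '2') (b := '3') (by decide)]

theorem pv_filt4 : (fun x : String × String => pvKeyOf x == "F4XXX_district")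
    = (fun vi : String × String => PySem.Str.startswith vi.1 "F4") := by
  funext x; unfold pvKeyOf
  split_ifs <;> simp_all [pv_sw_excl x.1.toList (a := '1') (b := '4') (by decide),
    pv_sw_excl x.1.toList (a := '2') (b := '4') (by decide),
    pv_sw_excl x.1.toList (a := '3') (b := '4') (by decide)]

theorem pv_filt5 : (fun x : String × String => pvKeyOf x == "F5XXX_macro")
    = (fun vi : String × String => PySem.Str.startswith vi.1 "F5") := by
  funext x; unfold pvKeyOf
  split_ifs <;> simp_all [pv_sw_excl x.1.toList (a := '1') (b := '5') (by decide),
    pv_sw_excl x.1.toList (a := '2') (b := '5') (by decide),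
    pv_sw_excl x.1.toList (a := '3') (b := '5') (by decide),
    pv_sw_excl x.1.toList (a := '4') (b := '5') (by decide)]

theorem pv_filt_other : (fun x : String × String => pvKeyOf x == "other")
    = (fun vi : String × String =>
        !(pvPrefixes.any (fun cp => PySem.Str.startswith vi.1 cp.2))) := by
  funext x; unfold pvKeyOf pvPrefixes
  simp only [List.any_cons, List.any_nil]
  split_ifs <;> simp_all

-- ===== VERDICT (by name: the statement is the Claim_ definition above) =====
theorem categorize_by_variable_type_spec : Claim_equal_categorize_by_variable_type := by
  intro mappings _
  unfold Spec_categorize_by_variable_type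
  rw [pv_A_eq, pv_B_eq, pv_filt1, pv_filt2, pv_filt3, pv_filt4, pv_filt5, pv_filt_other]
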